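-- pv_equiv track=rewrite | github.com/thmsfnr/Projet_ASAIoT | controller/navigation.py | placeGpx
-- ===== SOURCE A (Python) =====
-- def placeGpx(index,trace):
--     """Find the latitude and longitude associated with an index"""
--
--     res = []
--     cpt = 2
--     while (cpt<len(trace)-1) and (len(res)<2):
--         if (cpt/2) == index:
--             res.append(trace[cpt])
--             res.append(trace[cpt+1])
--         cpt += 2
--     return res
-- ===== SOURCE B (Python) =====
-- def placeGpx(index, trace):
--     """Find the latitude and longitude associated with an index"""
--     c = 2 * index
--     if index >= 1 and c < len(trace) - 1:
--         return [trace[c], trace[c + 1]]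
--     return []
-- ===== Notes on version B (the rewrite author's own statement) =====
-- stated objective: faster
-- what changed: Replaces the linear while-loop scan over even offsets with a direct bound check and O(1) indexing at trace[2*index] and trace[2*index+1].
import Mathlib
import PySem

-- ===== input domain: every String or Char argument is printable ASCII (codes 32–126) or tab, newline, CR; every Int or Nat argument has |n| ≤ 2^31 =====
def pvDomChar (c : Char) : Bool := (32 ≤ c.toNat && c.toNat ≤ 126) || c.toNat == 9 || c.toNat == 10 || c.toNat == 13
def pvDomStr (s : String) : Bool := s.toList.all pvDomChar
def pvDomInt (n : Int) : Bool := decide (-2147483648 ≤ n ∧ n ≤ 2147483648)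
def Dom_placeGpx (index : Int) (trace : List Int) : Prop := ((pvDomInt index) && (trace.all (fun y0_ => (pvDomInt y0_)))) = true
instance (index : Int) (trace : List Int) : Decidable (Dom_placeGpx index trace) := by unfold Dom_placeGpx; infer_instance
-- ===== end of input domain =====

-- B replaces A's linear scan over even offsets with a bound check and direct O(1) indexing.

-- ===== PORT A =====
-- while loop ported as fuel recursion; fuel = trace.length + 1 suffices (cpt grows by 2 each step).
-- Python's `cpt/2 == index` is float division; cpt is always even and |values| small, so it is
-- exactly `cpt // 2 == index`, ported as PySem.Int.floordiv cpt 2 = index.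
-- trace[cpt] / trace[cpt+1] are always in range inside the loop, so `.getD 0` never supplies the default.
def placeGpxLoop (index : Int) (trace : List Int) : Nat → Int → List Int → List Int
  | 0, _, res => res
  | f + 1, cpt, res =>
    if cpt < (trace.length : Int) - 1 ∧ res.length < 2 then
      if PySem.Int.floordiv cpt 2 = index then
        placeGpxLoop index trace f (cpt + 2)
          (res ++ [(PySem.List.pyGet? trace cpt).getD 0, (PySem.List.pyGet? trace (cpt + 1)).getD 0])
      else
        placeGpxLoop index trace f (cpt + 2) res
    else res

def placeGpx (index : Int) (trace : List Int) : List Int :=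
  placeGpxLoop index trace (trace.length + 1) 2 []

-- ===== PORT B =====
def placeGpx_alt (index : Int) (trace : List Int) : List Int :=
  let c := 2 * index
  if 1 ≤ index ∧ c < (trace.length : Int) - 1 then
    [(PySem.List.pyGet? trace c).getD 0, (PySem.List.pyGet? trace (c + 1)).getD 0]
  else []

-- ===== PRECONDITION & SPEC =====
def Spec_placeGpx (index : Int) (trace : List Int) (out : List Int) : Prop := out = placeGpx_alt index trace
instance (index : Int) (trace : List Int) (out : List Int) : Decidable (Spec_placeGpx index trace out) := by unfold Spec_placeGpx; infer_instance

-- ===== CLAIM (what is proved, stated in full; the proofs are below) =====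
def Claim_equal_placeGpx : Prop := ∀ (index : Int) (trace : List Int), Dom_placeGpx index trace → Spec_placeGpx index trace (placeGpx index trace)

-- ===== LEMMAS AND PROOFS =====

-- once res already holds two elements, the loop returns it unchanged
theorem placeGpxLoop_full (index : Int) (trace : List Int) (f : Nat) (cpt : Int)
    (res : List Int) (h : 2 ≤ res.length) :
    placeGpxLoop index trace f cpt res = res := by
  cases f with
  | zero => rfl
  | succ f =>
    unfold placeGpxLoop
    rw [if_neg]
    omega

-- loop invariant: starting from an even cpt = 2k ≥ 2 with empty res and enough fuel,
-- the loop returns the pair at 2*index iff k ≤ index and 2*index < len-1.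
theorem placeGpxLoop_eq (index : Int) (trace : List Int) :
    ∀ (f : Nat) (cpt : Int), 2 ≤ cpt → cpt % 2 = 0 → (trace.length : Int) - 1 ≤ cpt + 2 * f →
    placeGpxLoop index trace f cpt [] =
      (if cpt ≤ 2 * index ∧ 2 * index < (trace.length : Int) - 1 then
        [(PySem.List.pyGet? trace (2 * index)).getD 0, (PySem.List.pyGet? trace (2 * index + 1)).getD 0]
      else []) := by
  intro f
  induction f with
  | zero =>
    intro cpt h2 _ hfuel
    rw [if_neg (by omega)]
    rfl
  | succ f ih =>
    intro cpt h2 heven hfuel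
    unfold placeGpxLoop
    by_cases hlt : cpt < (trace.length : Int) - 1
    · rw [if_pos ⟨hlt, by simp⟩]
      have hfd : PySem.Int.floordiv cpt 2 = cpt / 2 :=
        PySem.Int.floordiv_eq_ediv_of_pos (by omega)
      by_cases hm : PySem.Int.floordiv cpt 2 = index
      · rw [if_pos hm]
        have hcpt : cpt = 2 * index := by rw [hfd] at hm; omega
        rw [placeGpxLoop_full _ _ _ _ _ (by simp)]
        rw [if_pos (by omega), hcpt]
        simp
      · rw [if_neg hm]
        have hne : cpt ≠ 2 * index := by rw [hfd] at hm; omega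
        rw [ih (cpt + 2) (by omega) (by omega) (by omega)]
        by_cases hc : cpt + 2 ≤ 2 * index ∧ 2 * index < (trace.length : Int) - 1
        · rw [if_pos hc, if_pos (by omega)]
        · rw [if_neg hc, if_neg (by omega)]
    · rw [if_neg (by intro h; exact hlt h.1), if_neg (by omega)]

-- ===== VERDICT (by name: the statement is the Claim_ definition above) =====
theorem placeGpx_spec : Claim_equal_placeGpx := by
  intro index trace _
  unfold Spec_placeGpx placeGpx placeGpx_alt
  rw [placeGpxLoop_eq index trace (trace.length + 1) 2 (by omega) (by omega) (by omega)]
  by_cases h : 1 ≤ index ∧ 2 * index < (trace.length : Int) - 1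
  · rw [if_pos (by omega), if_pos h]
  · rw [if_neg (by omega), if_neg h]
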